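-- pv_equiv track=rewrite | github.com/Maxibon13/Game-Librarian | scripts/proc.py | _sanitize_tokens
-- ===== SOURCE A (Python) =====
-- STOPWORDS = {'a','an','the','of','and','or'}
--
-- def _sanitize_tokens(title):
--     t = (title or '').lower()
--     out = []
--     token = ''
--     for ch in t:
--         if ch.isalnum():
--             token += ch
--         else:
--             if len(token) >= 3 and token not in STOPWORDS:
--                 out.append(token)
--             token = ''
--     if len(token) >= 3 and token not in STOPWORDS:
--         out.append(token)
--     return out
-- ===== SOURCE B (Python) =====
-- STOPWORDS = {'a','an','the','of','and','or'}
--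
-- def _sanitize_tokens(title):
--     t = (title or '').lower()
--     cleaned = ''.join(ch if ch.isalnum() else ' ' for ch in t)
--     return [tok for tok in cleaned.split() if len(tok) >= 3 and tok not in STOPWORDS]
-- ===== Notes on version B (the rewrite author's own statement) =====
-- stated objective: simpler
-- what changed: Replaces the fused character-scan with an explicit token accumulator by three declarative passes: normalize each char to itself or a space, split on whitespace, then filter short/stopword tokens.
import Mathlib
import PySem

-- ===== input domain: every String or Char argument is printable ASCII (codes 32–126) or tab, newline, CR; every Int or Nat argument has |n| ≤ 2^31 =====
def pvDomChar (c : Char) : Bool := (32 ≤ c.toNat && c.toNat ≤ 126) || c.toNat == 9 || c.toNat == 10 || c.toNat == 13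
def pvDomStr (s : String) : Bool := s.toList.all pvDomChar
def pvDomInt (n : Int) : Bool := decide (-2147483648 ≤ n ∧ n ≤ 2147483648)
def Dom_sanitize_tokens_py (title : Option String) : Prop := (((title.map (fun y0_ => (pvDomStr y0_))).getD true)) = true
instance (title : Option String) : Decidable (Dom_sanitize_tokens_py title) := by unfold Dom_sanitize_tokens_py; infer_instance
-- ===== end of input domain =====

-- B builds a cleaned string (alnum chars kept, every other char mapped to a space),
-- splits it on whitespace, and filters short/stopword tokens; same result, plainer shape.

-- ===== PORT A =====
def pvStop : List String := ["a", "an", "the", "of", "and", "or"]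

-- 'len(token) >= 3 and token not in STOPWORDS' (token kept as List Char)
def pvKeep (tok : List Char) : Bool :=
  decide (3 ≤ tok.length) && !(pvStop.contains (String.ofList tok))

-- the body of A's for-loop: state = (out, token)
def pvStepA (st : List String × List Char) (ch : Char) : List String × List Char :=
  if PySem.Chars.isalnum ch then (st.1, st.2 ++ [ch])
  else if pvKeep st.2 then (st.1 ++ [String.ofList st.2], []) else (st.1, [])

def sanitize_tokens_py (title : Option String) : List String :=
  let t := PySem.Chars.lower (title.getD "").toList
  let st := t.foldl pvStepA ([], [])
  if pvKeep st.2 then st.1 ++ [String.ofList st.2] else st.1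

-- ===== PORT B =====
def sanitize_tokens_py_alt (title : Option String) : List String :=
  let t := PySem.Str.lower (title.getD "")
  let cleaned := String.ofList (t.toList.map (fun ch => if PySem.Chars.isalnum ch then ch else ' '))
  (PySem.Str.split₀ cleaned).filter
    (fun tok => decide (3 ≤ PySem.Str.len tok) && !(pvStop.contains tok))

-- ===== PRECONDITION & SPEC =====
def Spec_sanitize_tokens_py (title : Option String) (out : List String) : Prop := out = sanitize_tokens_py_alt title
instance (title : Option String) (out : List String) : Decidable (Spec_sanitize_tokens_py title out) := by unfold Spec_sanitize_tokens_py; infer_instance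

-- ===== CLAIM (what is proved, stated in full; the proofs are below) =====
def Claim_equal_sanitize_tokens_py : Prop := ∀ (title : Option String), Dom_sanitize_tokens_py title → Spec_sanitize_tokens_py title (sanitize_tokens_py title)

-- ===== LEMMAS AND PROOFS =====

-- On domain chars (all code points < 128) an alphanumeric char is never whitespace.
lemma alnum_not_space (c : Char) (h : pvDomChar c = true)
    (ha : PySem.Chars.isalnum c = true) : PySem.Chars.isspace c = false := by
  have hlt : c.toNat < 128 := by
    unfold pvDomChar at h; simp at h; omega
  have key : ∀ n : Fin 128, PySem.Chars.isalnum (Char.ofNat n.val) = true →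
      PySem.Chars.isspace (Char.ofNat n.val) = false := by decide
  have := key ⟨c.toNat, hlt⟩
  rw [Char.ofNat_toNat] at this
  exact this ha

-- lowerChar keeps domain chars in the domain
lemma dom_lowerChar (c : Char) (h : pvDomChar c = true) :
    pvDomChar (PySem.Chars.lowerChar c) = true := by
  have hlt : c.toNat < 128 := by
    unfold pvDomChar at h; simp at h; omega
  have key : ∀ n : Fin 128, pvDomChar (Char.ofNat n.val) = true →
      pvDomChar (PySem.Chars.lowerChar (Char.ofNat n.val)) = true := by decide
  have := key ⟨c.toNat, hlt⟩
  rw [Char.ofNat_toNat] at this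
  exact this h

-- split₀.go's accumulator prepends (reversed) to the final result
lemma go_acc (l : List Char) (cur : List Char) (acc : List (List Char)) :
    PySem.Chars.split₀.go l cur acc = acc.reverse ++ PySem.Chars.split₀.go l cur [] := by
  induction l generalizing cur acc with
  | nil => simp [PySem.Chars.split₀.go]; split <;> simp
  | cons c rest ih =>
    simp only [PySem.Chars.split₀.go]
    split
    · split
      · rw [ih [] acc]
      · rw [ih [] (cur.reverse :: acc), ih [] [cur.reverse]]; simp
    · rw [ih (c :: cur) acc, ih (c :: cur) []]

-- main invariant: A's fused scan (with final flush) equals filtering the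
-- whitespace-split of the cleaned character list
lemma key (l : List Char) (hdom : ∀ c ∈ l, pvDomChar c = true)
    (out : List String) (tok : List Char) :
    (if pvKeep (l.foldl pvStepA (out, tok)).2
       then (l.foldl pvStepA (out, tok)).1 ++ [String.ofList (l.foldl pvStepA (out, tok)).2]
       else (l.foldl pvStepA (out, tok)).1) =
    out ++ ((PySem.Chars.split₀.go (l.map (fun ch => if PySem.Chars.isalnum ch then ch else ' '))
        tok.reverse []).filter pvKeep).map String.ofList := by
  induction l generalizing out tok with
  | nil =>
    simp only [List.foldl_nil, List.map_nil, PySem.Chars.split₀.go]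
    by_cases he : tok = []
    · subst he; simp [pvKeep]
    · have hne : tok.reverse.isEmpty = false := by simp [he]
      rw [hne]
      by_cases hk : pvKeep tok = true
      · simp [hk]
      · have hk' : pvKeep tok = false := by simpa using hk
        simp [hk']
  | cons c rest ih =>
    have hc := hdom c (by simp)
    have hrest : ∀ x ∈ rest, pvDomChar x = true := fun x hx => hdom x (by simp [hx])
    simp only [List.foldl_cons, List.map_cons]
    by_cases ha : PySem.Chars.isalnum c = true
    · rw [show pvStepA (out, tok) c = (out, tok ++ [c]) by simp [pvStepA, ha]]
      rw [show (if PySem.Chars.isalnum c then c else ' ') = c by simp [ha]]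
      rw [show PySem.Chars.split₀.go
            (c :: rest.map (fun ch => if PySem.Chars.isalnum ch then ch else ' '))
            tok.reverse [] =
          PySem.Chars.split₀.go
            (rest.map (fun ch => if PySem.Chars.isalnum ch then ch else ' '))
            (c :: tok.reverse) [] by
        simp only [PySem.Chars.split₀.go]
        rw [alnum_not_space c hc ha]
        simp]
      have := ih hrest out (tok ++ [c])
      simpa using this
    · have ha' : PySem.Chars.isalnum c = false := by simpa using ha
      rw [show (if PySem.Chars.isalnum c then c else ' ') = ' ' by simp [ha']]
      by_cases he : tok = []
      · subst he
        rw [show pvStepA (out, []) c = (out, []) by simp [pvStepA, ha', pvKeep]]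
        rw [show PySem.Chars.split₀.go
              (' ' :: rest.map (fun ch => if PySem.Chars.isalnum ch then ch else ' '))
              ([] : List Char).reverse [] =
            PySem.Chars.split₀.go
              (rest.map (fun ch => if PySem.Chars.isalnum ch then ch else ' ')) [] [] by
          simp [PySem.Chars.split₀.go, show PySem.Chars.isspace ' ' = true by decide]]
        exact ih hrest out []
      · have hne : tok.reverse.isEmpty = false := by simp [he]
        rw [show PySem.Chars.split₀.go
              (' ' :: rest.map (fun ch => if PySem.Chars.isalnum ch then ch else ' '))
              tok.reverse [] =
            PySem.Chars.split₀.go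
              (rest.map (fun ch => if PySem.Chars.isalnum ch then ch else ' '))
              [] [tok.reverse.reverse] by
          simp [PySem.Chars.split₀.go, hne, show PySem.Chars.isspace ' ' = true by decide]]
        rw [go_acc _ [] [tok.reverse.reverse]]
        simp only [List.reverse_reverse]
        by_cases hk : pvKeep tok = true
        · rw [show pvStepA (out, tok) c = (out ++ [String.ofList tok], []) by
            simp [pvStepA, ha', hk]]
          have := ih hrest (out ++ [String.ofList tok]) []
          simp only [List.reverse_nil] at this
          rw [this]
          simp [hk]
        · have hk' : pvKeep tok = false := by simpa using hk
          rw [show pvStepA (out, tok) c = (out, []) by simp [pvStepA, ha', hk']]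
          have := ih hrest out []
          simp only [List.reverse_nil] at this
          rw [this]
          simp [hk']

-- ===== VERDICT (by name: the statement is the Claim_ definition above) =====
theorem sanitize_tokens_py_spec : Claim_equal_sanitize_tokens_py := by
  intro title hdom
  unfold Spec_sanitize_tokens_py sanitize_tokens_py sanitize_tokens_py_alt
  have hstr : pvDomStr (title.getD "") = true := by
    cases title with
    | none => decide
    | some s => simpa [Dom_sanitize_tokens_py] using hdom
  have hall : ∀ c ∈ PySem.Chars.lower (title.getD "").toList, pvDomChar c = true := by
    intro c hc
    simp only [PySem.Chars.lower, List.mem_map] at hc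
    obtain ⟨d, hd, rfl⟩ := hc
    have := (List.all_eq_true.mp (by simpa [pvDomStr] using hstr)) d hd
    exact dom_lowerChar d this
  have hk := key _ hall [] []
  simp only [List.reverse_nil] at hk
  simp only []
  rw [hk]
  simp only [PySem.Str.split₀, PySem.Str.toList_lower, String.toList_ofList,
    PySem.Chars.split₀, List.filter_map, List.nil_append]
  congr 1
  apply List.filter_congr
  intro tk _
  simp [pvKeep, PySem.Str.len]
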